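-- pv_equiv track=rewrite | github.com/donut0310/Problem-Solving-Python- | Programmers/Level2/[카카오 블라인드]n 진수 게임.py | solution
-- ===== SOURCE A (Python) =====
-- def make(n,i,total,narray):
--     arr = []
--     if i<n:
--         return [i]
--     while i>=n:
--         arr.append(i%n)
--         i//=n
--     arr.append(i)
--     return arr[::-1]
--
-- def solution(n, t, m, p):
--     answer = ''
--     total = t * m
--     dict = {10:'A',11:'B',12:'C',13:'D',14:'E',15:'F'}
--
--     narray = []
--     i=0
--     while 1:
--         narray.extend(make(n,i,total,narray))
--         if len(narray)>=total:
--             break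
--         i+=1
--     for index in range(p-1,len(narray[:total]),m):
--         s = narray[index]
--         if s>9:
--             answer+=str(dict[s])
--         else:
--             answer+=str(narray[index])
--     return answer
-- ===== SOURCE B (Python) =====
-- def solution(n, t, m, p):
--     digits = "0123456789ABCDEF"
--     total = t * m
--
--     def digit_at(idx):
--         # which character of the infinite stream 0,1,2,... written in base n sits at idx
--         if idx < n:
--             return digits[idx]
--         rem = idx - n
--         d = 2
--         while True:
--             count = (n ** d - n ** (d - 1)) * d  # stream chars used by all d-digit numbers
--             if rem < count:
--                 num = n ** (d - 1) + rem // d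
--                 off = rem % d
--                 val = (num // n ** (d - 1 - off)) % n
--                 return digits[val]
--             rem -= count
--             d += 1
--
--     return ''.join(digit_at(idx) for idx in range(p - 1, total, m))
-- ===== Notes on version B (the rewrite author's own statement) =====
-- stated objective: faster
-- what changed: Instead of materializing the whole base-n digit stream up to t*m characters and indexing into it, B computes each of the t sampled characters directly by block arithmetic: it locates which d-digit block the global index falls in, recovers the containing number and digit offset by division, and extracts that single base-n digit.
-- outside the precondition, e.g. on solution(2, 1, 1, 0): A returns '00', B returns 'F0'; on solution(2, 1, -1, 1): A returns '', B returns '0'; on solution(17, 1, 1, 1): A returns '0', B returns '0'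
import Mathlib
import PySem

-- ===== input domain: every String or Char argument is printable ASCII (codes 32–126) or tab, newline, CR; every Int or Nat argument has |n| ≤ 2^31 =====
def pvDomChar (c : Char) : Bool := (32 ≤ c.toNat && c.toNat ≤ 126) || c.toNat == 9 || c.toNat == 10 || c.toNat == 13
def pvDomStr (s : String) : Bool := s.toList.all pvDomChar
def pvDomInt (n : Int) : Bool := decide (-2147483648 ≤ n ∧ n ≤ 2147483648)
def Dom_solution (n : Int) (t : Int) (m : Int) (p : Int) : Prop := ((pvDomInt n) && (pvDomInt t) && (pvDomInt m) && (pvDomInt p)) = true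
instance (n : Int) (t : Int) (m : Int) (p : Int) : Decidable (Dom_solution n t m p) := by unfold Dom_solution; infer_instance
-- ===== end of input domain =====

-- B replaces A's materialized digit stream by per-sample block arithmetic (equivalence of return values on Pre_).

-- ===== PORT A =====
-- while i >= n: arr.append(i % n); i //= n   (fuel 64 suffices: inside Pre_ every i fed to make is < 2^62 < n^64)
def makeLoop (n : Int) : Nat → Int → List Int → List Int × Int
  | 0, i, arr => (arr, i)
  | f+1, i, arr =>
    if n ≤ i then makeLoop n f (PySem.Int.floordiv i n) (arr ++ [PySem.Int.mod i n])
    else (arr, i)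

def make (n i : Int) : List Int :=
  if i < n then [i]
  else
    let r := makeLoop n 64 i []
    (r.1 ++ [r.2]).reverse

-- while 1: narray.extend(make(n,i)); if len(narray) >= total: break; i += 1   (fuel total.toNat+1 suffices inside Pre_)
def buildLoop (n total : Int) : Nat → Int → List Int → List Int
  | 0, _, narray => narray
  | f+1, i, narray =>
    let narray' := narray ++ make n i
    if total ≤ (narray'.length : Int) then narray'
    else buildLoop n total f (i+1) narray'

def hexDict : PySem.Dict Int (List Char) :=
  PySem.Dict.ofList [(10,['A']),(11,['B']),(12,['C']),(13,['D']),(14,['E']),(15,['F'])]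

def solution (n : Int) (t : Int) (m : Int) (p : Int) : String :=
  let total := t * m
  let narray := buildLoop n total (total.toNat + 1) 0 []
  let stop : Int := (PySem.List.slice narray none (some total)).length
  let answer := (PySem.List.pyRange (p-1) stop m).foldl (fun answer index =>
      let s := PySem.List.pyGetD narray index 0
      if s > 9 then answer ++ (hexDict.getD s [])
      else answer ++ PySem.Int.toChars (PySem.List.pyGetD narray index 0)) []
  String.ofList answer

-- ===== PORT B =====
def hexDigits : List Char := ['0','1','2','3','4','5','6','7','8','9','A','B','C','D','E','F']

-- while True: count = (n**d - n**(d-1))*d; if rem < count: … return; rem -= count; d += 1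
-- (fuel 70 suffices inside Pre_: rem < 2^62 is consumed before d reaches 71; Python's n**e with
--  e ≥ 0 is n ^ e.toNat here — every exponent below is ≥ 0 since 2 ≤ d and off < d)
def blockLoop (n : Int) : Nat → Int → Int → Char
  | 0, _, _ => ' '
  | f+1, rem, d =>
    let count := (n ^ d.toNat - n ^ (d-1).toNat) * d
    if rem < count then
      let num := n ^ (d-1).toNat + PySem.Int.floordiv rem d
      let off := PySem.Int.mod rem d
      let val := PySem.Int.mod (PySem.Int.floordiv num (n ^ (d - 1 - off).toNat)) n
      (PySem.List.pyGet? hexDigits val).getD ' '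
    else blockLoop n f (rem - count) (d + 1)

def digitAt (n idx : Int) : Char :=
  if idx < n then (PySem.List.pyGet? hexDigits idx).getD ' '
  else blockLoop n 70 (idx - n) 2

def solution_alt (n : Int) (t : Int) (m : Int) (p : Int) : String :=
  String.ofList ((PySem.List.pyRange (p - 1) (t * m) m).map (digitAt n))

-- ===== PRECONDITION & SPEC =====
-- Pre_ excludes: n outside 2..16 (A raises KeyError/ZeroDivisionError or diverges once an
-- out-of-range digit is reached), m ≤ 0 (A's range raises ValueError for m = 0, and for m < 0
-- scans backwards, raising IndexError or returning an accidental ''), and p ≤ 0, where A's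
-- negative sample index wraps around into the over-built digit buffer, whose length beyond
-- total is an artefact of A's build loop.
def Pre_solution (n : Int) (t : Int) (m : Int) (p : Int) : Prop :=
  2 ≤ n ∧ n ≤ 16 ∧ 1 ≤ m ∧ 1 ≤ p
instance (n : Int) (t : Int) (m : Int) (p : Int) : Decidable (Pre_solution n t m p) := by
  unfold Pre_solution; infer_instance
def pvWitness_solution : Int × Int × Int × Int := (2, 3, 2, 1)

def Spec_solution (n : Int) (t : Int) (m : Int) (p : Int) (out : String) : Prop := out = solution_alt n t m p
instance (n : Int) (t : Int) (m : Int) (p : Int) (out : String) : Decidable (Spec_solution n t m p out) := by unfold Spec_solution; infer_instance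

-- ===== CLAIM (what is proved, stated in full; the proofs are below) =====
def Claim_equal_solution : Prop := ∀ (n : Int) (t : Int) (m : Int) (p : Int), Dom_solution n t m p → Pre_solution n t m p → Spec_solution n t m p (solution n t m p)

-- ===== LEMMAS AND PROOFS =====

-- base-N representation of v, most significant digit first ([0] for v = 0)
def rep (N v : Nat) : List Nat := if v = 0 then [0] else (Nat.digits N v).reverse

theorem rep_ne_nil (N v : Nat) : rep N v ≠ [] := by
  unfold rep
  split
  · simp
  · simpa [Nat.digits_ne_nil_iff_ne_zero] using ‹¬ v = 0›

theorem length_rep_pos (N v : Nat) : 0 < (rep N v).length :=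
  List.length_pos_iff.mpr (rep_ne_nil N v)

-- the digit of the infinite stream rep v, rep (v+1), … at offset idx
def sdigit (N v idx : Nat) : Nat :=
  if h : idx < (rep N v).length then (rep N v)[idx]
  else sdigit N (v+1) (idx - (rep N v).length)
termination_by idx
decreasing_by
  have := length_rep_pos N v
  omega

-- total number of stream positions occupied by the numbers 0, …, v-1
def S (N v : Nat) : Nat := ((List.range v).map fun w => (rep N w).length).sum

theorem S_succ (N v : Nat) : S N (v+1) = S N v + (rep N v).length := by
  simp [S, List.range_succ]

theorem self_le_S (N v : Nat) : v ≤ S N v := by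
  induction v with
  | zero => simp [S]
  | succ v ih =>
    have := length_rep_pos N v
    rw [S_succ]; omega

theorem length_rep (N v : Nat) (hN : 2 ≤ N) :
    (rep N v).length = Nat.log N v + 1 := by
  unfold rep
  split
  · subst v; simp
  · rw [List.length_reverse, Nat.length_digits N v (by omega) ‹¬ v = 0›]

theorem rep_small (N v : Nat) (hN : 2 ≤ N) (h : v < N) : rep N v = [v] := by
  unfold rep
  split
  · simp [‹v = 0›]
  · rw [Nat.digits_def' (by omega : 1 < N) (by omega : 0 < v),
        Nat.mod_eq_of_lt h, Nat.div_eq_of_lt h]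
    simp

theorem rep_lt (N v x : Nat) (hN : 2 ≤ N) (hx : x ∈ rep N v) : x < N := by
  unfold rep at hx
  split at hx
  · simp at hx; omega
  · exact Nat.digits_lt_base (by omega) (List.mem_reverse.mp hx)

theorem rep_len_block (N v d : Nat) (hN : 2 ≤ N) (hd : 1 ≤ d)
    (h1 : N^(d-1) ≤ v) (h2 : v < N^d) : (rep N v).length = d := by
  have hv : 1 ≤ v := le_trans (Nat.one_le_pow _ _ (by omega)) h1
  have hlog : Nat.log N v = d - 1 :=
    Nat.log_eq_of_pow_le_of_lt_pow h1 (by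
      have : d - 1 + 1 = d := by omega
      rw [this]; exact h2)
  rw [length_rep N v hN, hlog]; omega

theorem rep_getElem (N v i : Nat) (hN : 2 ≤ N) (h : i < (rep N v).length) :
    (rep N v)[i] = v / N ^ ((rep N v).length - 1 - i) % N := by
  by_cases hv : v = 0
  · subst hv
    have hl : (rep N 0).length = 1 := by simp [rep]
    have hi : i = 0 := by omega
    subst hi
    simp [rep, Nat.zero_mod]
  · have hrep : rep N v = (Nat.digits N v).reverse := by simp [rep, hv]
    have hlen : (rep N v).length = (Nat.digits N v).length := by
      rw [hrep, List.length_reverse]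
    have h' : i < (Nat.digits N v).reverse.length := by rw [← hrep]; exact h
    calc (rep N v)[i] = (Nat.digits N v).reverse[i]'h' := by simp_rw [hrep]
      _ = (Nat.digits N v)[(Nat.digits N v).length - 1 - i]'(by
            simp at h'; omega) := by rw [List.getElem_reverse]
      _ = (Nat.digits N v).getD ((Nat.digits N v).length - 1 - i) 0 := by
            rw [List.getD_eq_getElem]
      _ = v / N ^ ((Nat.digits N v).length - 1 - i) % N := Nat.getD_digits v _ hN
      _ = v / N ^ ((rep N v).length - 1 - i) % N := by rw [hlen]

theorem S_block (N d : Nat) (hN : 2 ≤ N) (hd : 1 ≤ d) :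
    ∀ q, q ≤ N^d - N^(d-1) → S N (N^(d-1) + q) = S N (N^(d-1)) + q * d := by
  intro q
  induction q with
  | zero => simp
  | succ q ih =>
    intro hq
    have hle : N^(d-1) ≤ N^d := Nat.pow_le_pow_right (by omega) (by omega)
    have hlen : (rep N (N^(d-1) + q)).length = d :=
      rep_len_block N _ d hN hd (by omega) (by omega)
    have : N^(d-1) + (q+1) = (N^(d-1) + q) + 1 := by omega
    rw [this, S_succ, ih (by omega), hlen]
    ring

theorem S_base (N : Nat) (hN : 2 ≤ N) : S N N = N := by
  have h := S_block N 1 hN (le_refl 1) (N - 1) (by simp)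
  have h1 : S N 1 = 1 := by
    have : (rep N 0).length = 1 := by simp [rep]
    simp [S, this]
  simp at h
  have : 1 + (N - 1) = N := by omega
  rw [this] at h
  rw [h, h1]; omega

theorem sdigit_walk (N : Nat) :
    ∀ (k w j : Nat), j < (rep N (w+k)).length →
      sdigit N w (((List.range k).map fun u => (rep N (w+u)).length).sum + j)
        = (rep N (w+k)).getD j 0 := by
  intro k
  induction k with
  | zero =>
    intro w j h
    simp only [Nat.add_zero] at h ⊢
    simp only [List.range_zero, List.map_nil, List.sum_nil, Nat.zero_add]
    rw [sdigit, dif_pos h, List.getD_eq_getElem _ _ h]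
  | succ k ih =>
    intro w j h
    have hshift : ((List.range (k+1)).map fun u => (rep N (w+u)).length).sum
        = (rep N w).length + ((List.range k).map fun u => (rep N ((w+1)+u)).length).sum := by
      rw [List.range_succ_eq_map]
      simp only [List.map_cons, List.sum_cons, List.map_map, Nat.add_zero]
      congr 1
      congr 1
      apply List.map_congr_left
      intro u _
      show (rep N (w + (u+1))).length = (rep N ((w+1)+u)).length
      congr 2
      omega
    rw [hshift]
    have hlp := length_rep_pos N w
    rw [sdigit, dif_neg (by omega)]
    have harg : (rep N w).length + ((List.range k).map fun u => (rep N ((w+1)+u)).length).sum + j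
        - (rep N w).length = ((List.range k).map fun u => (rep N ((w+1)+u)).length).sum + j := by omega
    rw [harg]
    have h' : j < (rep N ((w+1)+k)).length := by
      have : (w+1)+k = w + (k+1) := by omega
      rw [this]; exact h
    rw [ih (w+1) j h']
    congr 2
    omega

theorem sdigit_spec (N v j : Nat) (h : j < (rep N v).length) :
    sdigit N 0 (S N v + j) = (rep N v).getD j 0 := by
  have := sdigit_walk N v 0 j (by simpa using h)
  simpa [S] using this

theorem sdigit_lt (N : Nat) (hN : 2 ≤ N) : ∀ idx v, sdigit N v idx < N := by
  intro idx
  induction idx using Nat.strong_induction_on with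
  | _ idx ih =>
    intro v
    rw [sdigit]
    split
    · exact rep_lt N v _ hN (List.getElem_mem _)
    · have hlp := length_rep_pos N v
      exact ih _ (by omega) (v+1)

theorem sdigit_small_aux (N : Nat) (hN : 2 ≤ N) :
    ∀ i v, v + i < N → sdigit N v i = v + i := by
  intro i
  induction i with
  | zero =>
    intro v h
    rw [sdigit, dif_pos (by simp [rep_small N v hN (by omega)])]
    simp [rep_small N v hN (by omega)]
  | succ i ih =>
    intro v h
    have hrs : rep N v = [v] := rep_small N v hN (by omega)
    rw [sdigit, dif_neg (by simp [hrs])]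
    simp only [hrs, List.length_cons, List.length_nil]
    have : i + 1 - 1 = i := by omega
    rw [this, ih (v+1) (by omega)]
    omega

theorem sdigit_small (N i : Nat) (hN : 2 ≤ N) (h : i < N) : sdigit N 0 i = i := by
  simpa using sdigit_small_aux N hN i 0 (by omega)

def stream (N K : Nat) : List Nat := (List.range K).flatMap (rep N)

theorem length_stream (N K : Nat) : (stream N K).length = S N K := by
  simp [stream, S, List.length_flatMap]

theorem stream_getElem_from (N : Nat) :
    ∀ (K w j : Nat) (h : j < (((List.range K).flatMap fun u => rep N (w+u))).length),
      ((List.range K).flatMap fun u => rep N (w+u))[j] = sdigit N w j := by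
  intro K
  induction K with
  | zero => intro w j h; simp at h
  | succ K ih =>
    intro w j h
    have hdec : ((List.range (K+1)).flatMap fun u => rep N (w+u))
        = rep N w ++ ((List.range K).flatMap fun u => rep N ((w+1)+u)) := by
      rw [List.range_succ_eq_map]
      simp only [List.flatMap_cons, List.flatMap_map, Nat.add_zero]
      congr 1
      have hfun : (fun a => rep N (w+(a+1))) = (fun u => rep N ((w+1)+u)) := by
        funext u; congr 1; omega
      rw [hfun]
    rw [hdec] at h
    rw [List.getElem_of_eq hdec]
    by_cases hj : j < (rep N w).length
    · rw [List.getElem_append_left hj, sdigit, dif_pos hj]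
    · rw [List.getElem_append_right (Nat.le_of_not_lt hj), sdigit, dif_neg hj]
      exact ih (w+1) _ (by simp at h ⊢; omega)

theorem stream_getElem (N K j : Nat) (h : j < (stream N K).length) :
    (stream N K)[j] = sdigit N 0 j := by
  have h' : j < (((List.range K).flatMap fun u => rep N (0+u))).length := by
    simpa [stream] using h
  have := stream_getElem_from N K 0 j h'
  simpa [stream] using this


-- ---- A-side: make/buildLoop produce the digit stream ----

theorem makeLoop_spec (Nt : Nat) (hN : 2 ≤ Nt) :
    ∀ (fuel iN : Nat) (arr : List Int), 1 ≤ iN → iN < Nt ^ fuel →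
      (makeLoop (Nt:Int) fuel (iN:Int) arr).1 ++ [(makeLoop (Nt:Int) fuel (iN:Int) arr).2]
        = arr ++ (Nat.digits Nt iN).map Int.ofNat := by
  intro fuel
  induction fuel with
  | zero =>
    intro iN arr h1 h2
    simp at h2; omega
  | succ fuel ih =>
    intro iN arr h1 h2
    by_cases hge : Nt ≤ iN
    · rw [makeLoop, if_pos (by exact_mod_cast hge)]
      rw [PySem.Int.floordiv_natCast, PySem.Int.mod_natCast]
      rw [ih (iN / Nt) (arr ++ [((iN % Nt : Nat) : Int)])
        (Nat.one_le_div_iff (by omega) |>.mpr hge)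
        ((Nat.div_lt_iff_lt_mul (by omega)).mpr (by
          rw [← pow_succ]; exact h2))]
      rw [Nat.digits_def' (by omega : 1 < Nt) (by omega : 0 < iN)]
      simp
    · rw [makeLoop, if_neg (by exact_mod_cast hge)]
      rw [Nat.digits_def' (by omega : 1 < Nt) (by omega : 0 < iN),
          Nat.mod_eq_of_lt (by omega), Nat.div_eq_of_lt (by omega)]
      simp

theorem make_spec (Nt : Nat) (hN : 2 ≤ Nt) (iN : Nat) (hub : iN < Nt ^ 64) :
    make (Nt:Int) (iN:Int) = (rep Nt iN).map Int.ofNat := by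
  by_cases hlt : iN < Nt
  · rw [make, if_pos (by exact_mod_cast hlt), rep_small Nt iN hN hlt]
    simp
  · rw [make, if_neg (by exact_mod_cast hlt)]
    have h := makeLoop_spec Nt hN 64 iN [] (by omega) hub
    simp only [List.nil_append] at h
    show ((makeLoop (Nt:Int) 64 (iN:Int) []).1 ++ [(makeLoop (Nt:Int) 64 (iN:Int) []).2]).reverse = _
    rw [h]
    have hrepd : rep Nt iN = (Nat.digits Nt iN).reverse := by simp [rep]; omega
    rw [hrepd]
    rw [List.map_reverse]

theorem buildLoop_spec (Nt : Nat) (hN : 2 ≤ Nt) (total : Int) (htot : 1 ≤ total)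
    (hbound : total ≤ 2^62) :
    ∀ (fuel v : Nat), ((S Nt v : Int) < total ∨ v = 0) → total ≤ (S Nt (v + fuel) : Int) →
      ∃ K, buildLoop (Nt:Int) total fuel ((v:Nat):Int) ((stream Nt v).map Int.ofNat)
            = (stream Nt K).map Int.ofNat ∧ total ≤ (S Nt K : Int) := by
  intro fuel
  induction fuel with
  | zero =>
    intro v hinv hfuel
    exfalso
    rcases hinv with h | h
    · simp only [Nat.add_zero] at hfuel; omega
    · subst h; simp [S] at hfuel; omega
  | succ fuel ih =>
    intro v hinv hfuel
    have hvlt : v < Nt ^ 64 := by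
      have hvS := self_le_S Nt v
      have h64 : (2:Nat) ^ 64 ≤ Nt ^ 64 := Nat.pow_le_pow_left hN 64
      rcases hinv with h | h
      · have : (v : Int) < total := by
          calc (v:Int) ≤ (S Nt v : Int) := by exact_mod_cast hvS
            _ < total := h
        have : (v:Int) < 2^62 := lt_of_lt_of_le this hbound
        have : v < 2^62 := by exact_mod_cast this
        calc v < 2^62 := this
          _ ≤ 2^64 := by norm_num
          _ ≤ Nt^64 := h64
      · subst h
        calc 0 < 2^64 := by norm_num
          _ ≤ Nt^64 := h64
    rw [buildLoop]
    have hext : (stream Nt v).map Int.ofNat ++ make (Nt:Int) ((v:Nat):Int)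
        = (stream Nt (v+1)).map Int.ofNat := by
      rw [make_spec Nt hN v hvlt]
      rw [← List.map_append]
      congr 1
      simp [stream, List.range_succ]
    rw [hext]
    have hlen : (((stream Nt (v+1)).map Int.ofNat).length : Int) = (S Nt (v+1) : Int) := by
      simp [length_stream]
    by_cases hbr : total ≤ (((stream Nt (v+1)).map Int.ofNat).length : Int)
    · rw [if_pos hbr]
      exact ⟨v+1, rfl, by rw [← hlen]; exact hbr⟩
    · rw [if_neg hbr]
      have hcast : ((v:Nat):Int) + 1 = (((v+1 : Nat)):Int) := by push_cast; ring
      rw [hcast]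
      apply ih (v+1) (Or.inl (by rw [hlen] at hbr; omega))
      have : v + 1 + fuel = v + (fuel + 1) := by omega
      rw [this]
      exact hfuel

-- ---- B-side: blockLoop finds the stream digit by block arithmetic ----

theorem hexGet : ∀ k : Nat, k < 16 →
    (PySem.List.pyGet? hexDigits ((k:Nat):Int)).getD ' ' = hexDigits.getD k ' ' := by decide

theorem charA : ∀ D : Nat, D < 16 →
    (if ((D:Nat):Int) > 9 then hexDict.getD ((D:Nat):Int) [] else PySem.Int.toChars ((D:Nat):Int))
      = [hexDigits.getD D ' '] := by decide

theorem blockLoop_spec (Nt : Nat) (hN : 2 ≤ Nt) (hN16 : Nt ≤ 16) (j : Nat) :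
    ∀ (fuel d : Nat), 2 ≤ d → S Nt (Nt^(d-1)) ≤ j → j < S Nt (Nt^(d-1+fuel)) →
      blockLoop (Nt:Int) fuel ((j:Int) - (S Nt (Nt^(d-1)) : Int)) ((d:Nat):Int)
        = hexDigits.getD (sdigit Nt 0 j) ' ' := by
  intro fuel
  induction fuel with
  | zero =>
    intro d hd hlo hhi
    simp only [Nat.add_zero] at hhi
    omega
  | succ fuel ih =>
    intro d hd hlo hhi
    have hdpos : 0 < d := by omega
    have hple : Nt^(d-1) ≤ Nt^d := Nat.pow_le_pow_right (by omega) (by omega)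
    have hSd : S Nt (Nt^d) = S Nt (Nt^(d-1)) + (Nt^d - Nt^(d-1)) * d := by
      have := S_block Nt d hN hdpos (Nt^d - Nt^(d-1)) (le_refl _)
      rwa [Nat.add_sub_cancel' hple] at this
    set r : Nat := j - S Nt (Nt^(d-1)) with hr
    set c : Nat := (Nt^d - Nt^(d-1)) * d with hc
    have hremc : (j:Int) - (S Nt (Nt^(d-1)) : Int) = ((r:Nat):Int) := by omega
    rw [blockLoop]
    dsimp only
    have htn1 : (((d:Nat):Int)).toNat = d := by omega
    have htn2 : (((d:Nat):Int) - 1).toNat = d - 1 := by omega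
    rw [htn1, htn2]
    have hcount : ((Nt:Int)) ^ d - ((Nt:Int)) ^ (d-1) = ((Nt^d - Nt^(d-1) : Nat) : Int) := by
      push_cast [Nat.cast_sub hple]
      ring
    have hcount' : (((Nt:Int)) ^ d - ((Nt:Int)) ^ (d-1)) * ((d:Nat):Int) = ((c:Nat):Int) := by
      rw [hcount, hc]; push_cast; ring
    rw [hremc, hcount']
    by_cases hbr : r < c
    · rw [if_pos (by exact_mod_cast hbr)]
      have hdiv : r / d < Nt^d - Nt^(d-1) := (Nat.div_lt_iff_lt_mul hdpos).mpr hbr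
      set num : Nat := Nt^(d-1) + r / d with hnum
      set off : Nat := r % d with hoff
      have hnum1 : 1 ≤ num := le_trans (Nat.one_le_pow _ _ (by omega)) (Nat.le_add_right _ _)
      have hnumlt : num < Nt^d := by omega
      have hlennum : (rep Nt num).length = d :=
        rep_len_block Nt num d hN hdpos (Nat.le_add_right _ _) hnumlt
      have hoffd : off < d := Nat.mod_lt _ hdpos
      have hfd : PySem.Int.floordiv ((r:Nat):Int) ((d:Nat):Int) = (((r/d : Nat)):Int) :=
        PySem.Int.floordiv_natCast r d
      have hmd : PySem.Int.mod ((r:Nat):Int) ((d:Nat):Int) = (((r%d : Nat)):Int) :=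
        PySem.Int.mod_natCast r d
      rw [hfd, hmd]
      have hnumc : ((Nt:Int)) ^ (d-1) + (((r/d : Nat)):Int) = ((num:Nat):Int) := by
        rw [hnum]; push_cast; ring
      rw [hnumc]
      have hexp : (((d:Nat):Int) - 1 - (((r%d : Nat)):Int)).toNat = d - 1 - off := by
        rw [hoff]; omega
      rw [hexp]
      have hpowc : ((Nt:Int)) ^ (d - 1 - off) = (((Nt ^ (d-1-off) : Nat)):Int) := by push_cast; ring
      rw [hpowc, PySem.Int.floordiv_natCast, PySem.Int.mod_natCast]
      have hval : num / Nt ^ (d-1-off) % Nt < 16 :=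
        lt_of_lt_of_le (Nat.mod_lt _ (by omega)) hN16
      rw [hexGet _ hval]
      congr 1
      -- sdigit Nt 0 j = num / Nt^(d-1-off) % Nt
      have hSnum : S Nt num = S Nt (Nt^(d-1)) + (r / d) * d :=
        S_block Nt d hN hdpos (r/d) (le_of_lt hdiv)
      have hj : j = S Nt num + off := by
        have h1 := Nat.div_add_mod r d
        have h2 : (r/d)*d = d*(r/d) := Nat.mul_comm _ _
        omega
      have hoffl : off < (rep Nt num).length := by omega
      rw [hj, sdigit_spec Nt num off hoffl, List.getD_eq_getElem _ _ hoffl,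
          rep_getElem Nt num off hN hoffl, hlennum]
    · rw [if_neg (by exact_mod_cast hbr)]
      have hlo' : S Nt (Nt^((d+1)-1)) ≤ j := by
        simp only [Nat.add_sub_cancel]
        omega
      have hhi' : j < S Nt (Nt^((d+1)-1+fuel)) := by
        have : (d+1)-1+fuel = d-1+(fuel+1) := by omega
        rw [this]
        exact hhi
      have harg : ((r:Nat):Int) - ((c:Nat):Int) = (j:Int) - (S Nt (Nt^((d+1)-1)) : Int) := by
        simp only [Nat.add_sub_cancel]
        omega
      have hdc : ((d:Nat):Int) + 1 = (((d+1 : Nat)):Int) := by push_cast; ring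
      rw [harg, hdc]
      exact ih (d+1) (by omega) hlo' hhi'

theorem digitAt_spec (Nt : Nat) (hN : 2 ≤ Nt) (hN16 : Nt ≤ 16) (j : Nat) (hj : j < 2^62) :
    digitAt (Nt:Int) ((j:Nat):Int) = hexDigits.getD (sdigit Nt 0 j) ' ' := by
  by_cases hlt : j < Nt
  · rw [digitAt, if_pos (by exact_mod_cast hlt), sdigit_small Nt j hN hlt,
        hexGet j (by omega)]
  · rw [digitAt, if_neg (by exact_mod_cast hlt)]
    have hS1 : S Nt (Nt^(2-1)) = Nt := by
      simpa using S_base Nt hN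
    have hbnd : j < S Nt (Nt^(2-1+70)) := by
      have h1 : (2:Nat)^71 ≤ Nt^71 := Nat.pow_le_pow_left hN 71
      have h2 : Nt^71 ≤ S Nt (Nt^71) := self_le_S Nt _
      have : j < 2^71 := by
        calc j < 2^62 := hj
          _ ≤ 2^71 := by norm_num
      simpa using lt_of_lt_of_le this (le_trans h1 h2)
    have := blockLoop_spec Nt hN hN16 j 70 2 (le_refl 2) (by omega) hbnd
    have harg : ((j:Nat):Int) - (Nt:Int) = (j:Int) - (S Nt (Nt^(2-1)) : Int) := by
      rw [hS1]
    rw [harg]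
    have h2c : ((2:Nat):Int) = (2:Int) := by norm_num
    rw [← h2c]
    exact this


-- ---- assembly ----

theorem flatMap_eq_map_of_singleton {α β : Type} (G : α → List β) (f : α → β) :
    ∀ (l : List α), (∀ x ∈ l, G x = [f x]) → l.flatMap G = l.map f := by
  intro l
  induction l with
  | nil => intro _; rfl
  | cons x xs ih =>
    intro h
    rw [List.flatMap_cons, List.map_cons, h x (by simp), ih (fun y hy => h y (by simp [hy]))]
    rfl

theorem main_eq (Nt : Nat) (hN2 : 2 ≤ Nt) (hN16 : Nt ≤ 16) (t m p : Int)
    (hm : 1 ≤ m) (hp : 1 ≤ p) (hbound : t * m ≤ 2^62) :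
    solution ((Nt:Nat):Int) t m p = solution_alt ((Nt:Nat):Int) t m p := by
  unfold solution solution_alt
  dsimp only
  by_cases htot : 1 ≤ t * m
  · -- main case: the stream really gets sampled
    obtain ⟨K, hK, hKtot⟩ := buildLoop_spec Nt hN2 (t*m) htot hbound ((t*m).toNat + 1) 0
      (Or.inr rfl)
      (by
        have h1 := self_le_S Nt (0 + ((t*m).toNat + 1))
        omega)
    rw [show ((0:Nat):Int) = (0:Int) from rfl,
        show (stream Nt 0).map Int.ofNat = ([] : List Int) from rfl] at hK
    rw [hK]
    have hlenn : (((stream Nt K).map Int.ofNat).length : Int) = (S Nt K : Int) := by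
      rw [List.length_map, length_stream]
    have hsl : PySem.List.slice ((stream Nt K).map Int.ofNat) none (some (t*m))
        = ((stream Nt K).map Int.ofNat).take (t*m).toNat :=
      PySem.List.slice_to _ (by omega)
    rw [hsl]
    have htklen : (((stream Nt K).map Int.ofNat).take (t*m).toNat).length = (t*m).toNat := by
      rw [List.length_take]
      have : (t*m).toNat ≤ ((stream Nt K).map Int.ofNat).length := by omega
      omega
    rw [htklen]
    have hstop : (((t*m).toNat : Nat) : Int) = t*m := by omega
    rw [hstop]
    -- pointwise equality on the sampled indices
    have hpt : ∀ idx ∈ PySem.List.pyRange (p-1) (t*m) m,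
        (if PySem.List.pyGetD ((stream Nt K).map Int.ofNat) idx 0 > 9
         then hexDict.getD (PySem.List.pyGetD ((stream Nt K).map Int.ofNat) idx 0) []
         else PySem.Int.toChars (PySem.List.pyGetD ((stream Nt K).map Int.ofNat) idx 0))
        = [digitAt ((Nt:Nat):Int) idx] := by
      intro idx hmem
      rw [PySem.List.mem_pyRange_iff_of_pos (by omega)] at hmem
      obtain ⟨h1, h2, -⟩ := hmem
      have hidx : idx = ((idx.toNat : Nat) : Int) := by omega
      set j : Nat := idx.toNat with hj
      have hjlen : j < ((stream Nt K).map Int.ofNat).length := by omega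
      have hjs : j < (stream Nt K).length := by rw [List.length_map] at hjlen; exact hjlen
      have hget : PySem.List.pyGetD ((stream Nt K).map Int.ofNat) idx 0
          = Int.ofNat (sdigit Nt 0 j) := by
        rw [hidx, PySem.List.pyGetD_natCast, List.getD_eq_getElem _ _ hjlen,
            List.getElem_map, stream_getElem Nt K j hjs]
      have hD16 : sdigit Nt 0 j < 16 := lt_of_lt_of_le (sdigit_lt Nt hN2 j 0) hN16
      have hofn : Int.ofNat (sdigit Nt 0 j) = ((sdigit Nt 0 j : Nat) : Int) := rfl
      rw [hget, hofn, charA (sdigit Nt 0 j) hD16]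
      congr 1
      rw [hidx, digitAt_spec Nt hN2 hN16 j (by omega)]
    have hfn : (fun (answer : List Char) (index : Int) =>
        if PySem.List.pyGetD ((stream Nt K).map Int.ofNat) index 0 > 9
        then answer ++ hexDict.getD (PySem.List.pyGetD ((stream Nt K).map Int.ofNat) index 0) []
        else answer ++ PySem.Int.toChars (PySem.List.pyGetD ((stream Nt K).map Int.ofNat) index 0))
        = (fun answer index => answer ++
            (if PySem.List.pyGetD ((stream Nt K).map Int.ofNat) index 0 > 9
             then hexDict.getD (PySem.List.pyGetD ((stream Nt K).map Int.ofNat) index 0) []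
             else PySem.Int.toChars (PySem.List.pyGetD ((stream Nt K).map Int.ofNat) index 0))) := by
      funext answer index
      by_cases h : PySem.List.pyGetD ((stream Nt K).map Int.ofNat) index 0 > 9 <;> simp [h]
    rw [hfn, PySem.List.foldl_append_eq_flatMap, List.nil_append]
    rw [flatMap_eq_map_of_singleton _ _ _ hpt]
  · -- t*m ≤ 0 : no position is sampled, both sides return ""
    have h0 : (t*m).toNat = 0 := by omega
    rw [h0, buildLoop]
    rw [make, if_pos (by exact_mod_cast Nat.lt_of_lt_of_le (by norm_num) hN2 : (0:Int) < ((Nt:Nat):Int))]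
    rw [if_pos (by simp; omega)]
    have hsl : PySem.List.slice ([] ++ [(0:Int)]) none (some (t*m)) = ([] : List Int) := by
      rcases eq_or_lt_of_le (by omega : t*m ≤ 0) with h | h
      · rw [h, show ((0:Int)) = ((0:Nat):Int) from rfl, PySem.List.slice_to_natCast]
        simp
      · have hk : t*m = -(((-(t*m)).toNat : Nat) : Int) := by omega
        rw [hk, PySem.List.slice_to_neg_natCast _ _ (by omega)]
        simp
        omega
    rw [hsl]
    rw [show (([] : List Int).length : Int) = ((0:Nat):Int) from rfl]
    rw [PySem.List.pyRange_of_pos _ _ (by omega : (0:Int) < m),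
        PySem.List.pyRange_of_pos _ _ (by omega : (0:Int) < m)]
    rw [if_neg (by push_cast; omega), if_neg (by omega)]
    simp

-- ===== VERDICT (by name: the statement is the Claim_ definition above) =====
theorem solution_spec : Claim_equal_solution := by
  unfold Claim_equal_solution
  intro n t m p hdom hpre
  obtain ⟨hn2, hn16, hm, hp⟩ := hpre
  unfold Dom_solution at hdom
  simp only [pvDomInt, Bool.and_eq_true, decide_eq_true_eq] at hdom
  obtain ⟨⟨⟨hdn, hdt⟩, hdm⟩, hdp⟩ := hdom
  have habs : t * m ≤ 2^62 := by
    have h1 : |t| ≤ 2^31 := abs_le.mpr (by constructor <;> omega)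
    have h2 : |m| ≤ 2^31 := abs_le.mpr (by constructor <;> omega)
    have h3 : |t * m| ≤ 2^31 * 2^31 := by
      rw [abs_mul]
      exact mul_le_mul h1 h2 (abs_nonneg m) (by positivity)
    have h4 := le_abs_self (t * m)
    omega
  unfold Spec_solution
  have hncast : ((n.toNat : Nat) : Int) = n := Int.toNat_of_nonneg (by omega)
  rw [← hncast]
  exact main_eq n.toNat (by omega) (by omega) t m p hm hp habs
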